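-- pv_equiv track=rewrite | github.com/prg-titech/vython | benchmark/code_generation.py | generate_vython_code
-- ===== SOURCE A (Python) =====
-- def generate_vython_code(loop, num_base_names, num_base_versions, num_actual_versions):
--     base_names = ["TestClass" + str(i) for i in range(num_base_names)]
--     with_version_values = []
--     code = ""
--
--     class_size = 0
--     for base_name in base_names:
--         if class_size >= num_actual_versions:
--                 break
--         for i in range(1, num_base_versions + 1):
--             code += f"class {base_name}!{i}:\n"
--             code += "    def __init__(self, v):\n"
--             code += "        self.v = v\n"
--             code += "    def get_v(self):\n"
--             code += "        return self.v\n\n"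
--
--             class_size += 1
--             if class_size >= num_actual_versions:
--                 break
--
--     instance_size = 0
--     for base_name in base_names:
--         if instance_size >= num_actual_versions:
--                 break
--         for i in range(1, num_base_versions + 1):
--             code += f"i{base_name.lower()}{i} = {base_name}!{i}(1)\n"
--
--             instance_size += 1
--             if instance_size >= num_actual_versions:
--                 break
--
--     code += "\n"
--
--     value_size = 0
--     for base_name in base_names:
--         if value_size >= num_actual_versions:
--                 break
--         for i in range(1, num_base_versions + 1):
--             code += f"v{base_name.lower()}{i} = i{base_name.lower()}{i}.get_v()\n"
--             with_version_values.append(f"v{base_name.lower()}{i}")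
--
--             value_size += 1
--             if value_size >= num_actual_versions:
--                 break
--
--     code += "\n"
--     for i in range(num_actual_versions):
--         if i != 0:
--             code += f"tmp = tmp + {with_version_values[i]}\n"
--         else:
--             code += f"tmp = {with_version_values[i]}\n"
--     for i in range(num_base_names * num_base_versions - num_actual_versions):
--             code += f"tmp = tmp + {with_version_values[0]}\n"
--     code += f"x = tmp\n"
--     code += f"y = tmp\n"
--
--     code += "\n"
--     code += "def loop(c, f, y):\n"
--     code += "    if c > 0:\n"
--     code += "        f(y)\n"
--     code += "        loop(c - 1, f, y)\n"
--     code += "    else:\n"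
--     code += "        return\n\n"
--     code += "f = x.__add__\n"
--     code += f"m = {loop}\n"
--     code += "\n"
--     code += "def main(m, f, y):\n"
--     code += "   loop(m, f, y)\n"
--
--     return code
-- ===== SOURCE B (Python) =====
-- def generate_vython_code(loop, num_base_names, num_base_versions, num_actual_versions):
--     # Precompute the selection once: the first num_actual_versions (name, version)
--     # pairs in flat enumeration order, then emit each section with one flat pass.
--     base_names = ["TestClass" + str(i) for i in range(num_base_names)]
--     pairs = [(name, i) for name in base_names
--              for i in range(1, num_base_versions + 1)]
--     selected = pairs[:max(num_actual_versions, 0)]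
--
--     parts = []
--     for name, i in selected:
--         parts.append(f"class {name}!{i}:\n"
--                      "    def __init__(self, v):\n"
--                      "        self.v = v\n"
--                      "    def get_v(self):\n"
--                      "        return self.v\n\n")
--     for name, i in selected:
--         parts.append(f"i{name.lower()}{i} = {name}!{i}(1)\n")
--     parts.append("\n")
--     for name, i in selected:
--         parts.append(f"v{name.lower()}{i} = i{name.lower()}{i}.get_v()\n")
--     parts.append("\n")
--
--     values = [f"v{name.lower()}{i}" for name, i in selected]
--     for idx, v in enumerate(values):
--         parts.append(f"tmp = tmp + {v}\n" if idx else f"tmp = {v}\n")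
--     for _ in range(num_base_names * num_base_versions - num_actual_versions):
--         parts.append(f"tmp = tmp + {values[0]}\n")
--
--     parts.append("x = tmp\ny = tmp\n"
--                  "\n"
--                  "def loop(c, f, y):\n"
--                  "    if c > 0:\n"
--                  "        f(y)\n"
--                  "        loop(c - 1, f, y)\n"
--                  "    else:\n"
--                  "        return\n\n"
--                  "f = x.__add__\n"
--                  f"m = {loop}\n"
--                  "\n"
--                  "def main(m, f, y):\n"
--                  "   loop(m, f, y)\n")
--     return "".join(parts)
-- ===== Notes on version B (the rewrite author's own statement) =====
-- stated objective: simpler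
-- what changed: B precomputes the flat (name, version) enumeration once and slices the first num_actual_versions pairs, then emits each code section with one flat pass over that slice, replacing A's three nested name/version loops with duplicated break-counter logic; Pre_ excludes only the inputs on which A raises IndexError.
import Mathlib
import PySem

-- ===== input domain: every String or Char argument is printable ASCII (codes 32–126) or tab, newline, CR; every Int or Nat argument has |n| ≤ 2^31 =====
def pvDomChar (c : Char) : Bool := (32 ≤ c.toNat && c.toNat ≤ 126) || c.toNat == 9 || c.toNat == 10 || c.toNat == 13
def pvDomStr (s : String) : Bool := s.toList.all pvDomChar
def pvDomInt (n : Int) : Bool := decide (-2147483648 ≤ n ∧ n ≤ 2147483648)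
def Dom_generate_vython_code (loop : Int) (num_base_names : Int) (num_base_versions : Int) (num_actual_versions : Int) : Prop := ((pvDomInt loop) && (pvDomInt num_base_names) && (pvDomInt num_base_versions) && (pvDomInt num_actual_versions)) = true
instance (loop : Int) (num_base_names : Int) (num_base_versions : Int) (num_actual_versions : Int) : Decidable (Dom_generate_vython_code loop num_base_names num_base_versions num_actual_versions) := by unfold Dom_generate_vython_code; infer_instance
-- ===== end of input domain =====

-- B replaces A's three nested name/version loops with break counters by one precomputed
-- flat (name, version) list sliced to the first num_actual_versions pairs and flat passes
-- over that slice (objective: simpler); same return value wherever A returns (Pre_ below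
-- excludes exactly the inputs on which A raises IndexError).

-- ===== PORT A =====
-- inner 'for i in range(1, num_base_versions+1)' loop with its
-- 'class_size += 1; if class_size >= num_actual_versions: break'; the range is
-- iterated by counter exactly as Python's lazy range object is
def pvA_inner {α : Type} (step : α → String → Int → α) (nm : String) (nbv : Int)
    (nav : Int) (st : α) (size : Int) (i : Int) : α × Int :=
  if nbv + 1 ≤ i then (st, size)
  else
    let st' := step st nm i
    let size' := size + 1
    if size' ≥ nav then (st', size') else pvA_inner step nm nbv nav st' size' (i + 1)
termination_by (nbv + 1 - i).toNat
decreasing_by omega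

-- outer 'for base_name in base_names' loop with its leading 'if size >= num_actual_versions: break'
def pvA_outer {α : Type} (step : α → String → Int → α) (names : List String) (nbv : Int)
    (nav : Int) (st : α) (size : Int) : α × Int :=
  match names with
  | [] => (st, size)
  | n :: rest =>
    if size ≥ nav then (st, size)
    else
      let p := pvA_inner step n nbv nav st size 1
      pvA_outer step rest nbv nav p.1 p.2

def generate_vython_code (loop : Int) (num_base_names : Int) (num_base_versions : Int) (num_actual_versions : Int) : String :=
  let base_names := (PySem.List.pyRange 0 num_base_names 1).map (fun i => "TestClass" ++ PySem.Int.toStr i)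
  -- class-definition loop (the successive 'code += …' lines appended per pair)
  let r1 := pvA_outer (fun c n i => c ++ "class " ++ n ++ "!" ++ PySem.Int.toStr i ++ ":\n" ++ "    def __init__(self, v):\n" ++ "        self.v = v\n" ++ "    def get_v(self):\n" ++ "        return self.v\n\n") base_names num_base_versions num_actual_versions "" 0
  -- instance loop
  let r2 := pvA_outer (fun c n i => c ++ "i" ++ PySem.Str.lower n ++ PySem.Int.toStr i ++ " = " ++ n ++ "!" ++ PySem.Int.toStr i ++ "(1)\n") base_names num_base_versions num_actual_versions r1.1 0
  let code2 := r2.1 ++ "\n"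
  -- value loop: appends to code and to with_version_values
  let r3 := pvA_outer (fun (cv : String × List String) n i => (cv.1 ++ "v" ++ PySem.Str.lower n ++ PySem.Int.toStr i ++ " = i" ++ PySem.Str.lower n ++ PySem.Int.toStr i ++ ".get_v()\n", cv.2 ++ ["v" ++ PySem.Str.lower n ++ PySem.Int.toStr i])) base_names num_base_versions num_actual_versions (code2, []) 0
  let wvv := r3.1.2
  let code3 := r3.1.1 ++ "\n"
  -- tmp accumulation; with_version_values[i] raises IndexError where pyGetD's default
  -- would be used — those inputs are exactly the ones Pre_ excludes
  let code4 := (PySem.List.pyRange 0 num_actual_versions 1).foldl (fun c i => if i ≠ 0 then c ++ "tmp = tmp + " ++ PySem.List.pyGetD wvv i "" ++ "\n" else c ++ "tmp = " ++ PySem.List.pyGetD wvv i "" ++ "\n") code3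
  let code5 := (PySem.List.pyRange 0 (num_base_names * num_base_versions - num_actual_versions) 1).foldl (fun c _ => c ++ "tmp = tmp + " ++ PySem.List.pyGetD wvv 0 "" ++ "\n") code4
  code5 ++ "x = tmp\n" ++ "y = tmp\n" ++ "\n" ++ "def loop(c, f, y):\n" ++ "    if c > 0:\n" ++ "        f(y)\n" ++ "        loop(c - 1, f, y)\n" ++ "    else:\n" ++ "        return\n\n" ++ "f = x.__add__\n" ++ "m = " ++ PySem.Int.toStr loop ++ "\n" ++ "\n" ++ "def main(m, f, y):\n" ++ "   loop(m, f, y)\n"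

-- ===== PORT B =====
-- the flat [(name, i) for name in base_names for i in range(1, num_base_versions+1)] list
def pvPairs (names : List String) (nbv : Int) : List (String × Int) :=
  names.flatMap (fun n => (PySem.List.pyRange 1 (nbv + 1) 1).map (fun i => (n, i)))

def pvB_classBlock (n : String) (i : Int) : String :=
  "class " ++ n ++ "!" ++ PySem.Int.toStr i ++ ":\n    def __init__(self, v):\n        self.v = v\n    def get_v(self):\n        return self.v\n\n"

def pvB_instLine (n : String) (i : Int) : String :=
  "i" ++ PySem.Str.lower n ++ PySem.Int.toStr i ++ " = " ++ n ++ "!" ++ PySem.Int.toStr i ++ "(1)\n"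

def pvB_vName (n : String) (i : Int) : String :=
  "v" ++ PySem.Str.lower n ++ PySem.Int.toStr i

def pvB_valLine (n : String) (i : Int) : String :=
  "v" ++ PySem.Str.lower n ++ PySem.Int.toStr i ++ " = i" ++ PySem.Str.lower n ++ PySem.Int.toStr i ++ ".get_v()\n"

def pvB_footer (loop : Int) : String :=
  "x = tmp\ny = tmp\n\ndef loop(c, f, y):\n    if c > 0:\n        f(y)\n        loop(c - 1, f, y)\n    else:\n        return\n\nf = x.__add__\nm = " ++ PySem.Int.toStr loop ++ "\n\ndef main(m, f, y):\n   loop(m, f, y)\n"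

def generate_vython_code_alt (loop : Int) (num_base_names : Int) (num_base_versions : Int) (num_actual_versions : Int) : String :=
  let base_names := (PySem.List.pyRange 0 num_base_names 1).map (fun i => "TestClass" ++ PySem.Int.toStr i)
  let selected := PySem.List.slice (pvPairs base_names num_base_versions) none (some (max num_actual_versions 0))
  let parts1 := selected.map (fun p => pvB_classBlock p.1 p.2)
  let parts2 := selected.map (fun p => pvB_instLine p.1 p.2)
  let parts3 := selected.map (fun p => pvB_valLine p.1 p.2)
  let values := selected.map (fun p => pvB_vName p.1 p.2)
  let parts4 := (PySem.List.enumerate values).map (fun q => if q.1 ≠ 0 then "tmp = tmp + " ++ q.2 ++ "\n" else "tmp = " ++ q.2 ++ "\n")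
  -- values[0] raises IndexError in Python where pyGetD's default would be used (outside Pre_)
  let parts5 := (PySem.List.pyRange 0 (num_base_names * num_base_versions - num_actual_versions) 1).map (fun _ => "tmp = tmp + " ++ PySem.List.pyGetD values 0 "" ++ "\n")
  PySem.Str.join "" (parts1 ++ parts2 ++ ["\n"] ++ parts3 ++ ["\n"] ++ parts4 ++ parts5 ++ [pvB_footer loop])

-- ===== PRECONDITION & SPEC =====
-- Pre_ holds exactly where Python A returns: it excludes only the inputs on which A raises
-- IndexError (with_version_values[i] with num_actual_versions beyond the generated pairs,
-- and with_version_values[0] in the padding loop when no value was generated).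
def Pre_generate_vython_code (loop : Int) (num_base_names : Int) (num_base_versions : Int) (num_actual_versions : Int) : Prop :=
  if 0 < num_actual_versions then num_actual_versions ≤ max num_base_names 0 * max num_base_versions 0
  else num_base_names * num_base_versions ≤ num_actual_versions

instance (loop : Int) (num_base_names : Int) (num_base_versions : Int) (num_actual_versions : Int) : Decidable (Pre_generate_vython_code loop num_base_names num_base_versions num_actual_versions) := by unfold Pre_generate_vython_code; infer_instance

def pvWitness_generate_vython_code : Int × Int × Int × Int := (3, 2, 2, 3)

def Spec_generate_vython_code (loop : Int) (num_base_names : Int) (num_base_versions : Int) (num_actual_versions : Int) (out : String) : Prop := out = generate_vython_code_alt loop num_base_names num_base_versions num_actual_versions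
instance (loop : Int) (num_base_names : Int) (num_base_versions : Int) (num_actual_versions : Int) (out : String) : Decidable (Spec_generate_vython_code loop num_base_names num_base_versions num_actual_versions out) := by unfold Spec_generate_vython_code; infer_instance

-- ===== CLAIM (what is proved, stated in full; the proofs are below) =====
def Claim_equal_generate_vython_code : Prop := ∀ (loop : Int) (num_base_names : Int) (num_base_versions : Int) (num_actual_versions : Int), Dom_generate_vython_code loop num_base_names num_base_versions num_actual_versions → Pre_generate_vython_code loop num_base_names num_base_versions num_actual_versions → Spec_generate_vython_code loop num_base_names num_base_versions num_actual_versions (generate_vython_code loop num_base_names num_base_versions num_actual_versions)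

-- ===== LEMMAS AND PROOFS =====

theorem sjoin_nil : PySem.Str.join "" ([] : List String) = "" := rfl

-- ''.join with empty separator, one element at a time
theorem sjoin_cons (s : String) (l : List String) :
    PySem.Str.join "" (s :: l) = s ++ PySem.Str.join "" l := by
  apply String.toList_inj.mp
  cases l with
  | nil => simp [PySem.Str.toList_join, PySem.Chars.join_singleton, PySem.Chars.join_nil]
  | cons t rest =>
    simp [PySem.Str.toList_join, PySem.Chars.join_cons_cons, String.toList_append,
      PySem.Str.toList_join]

theorem sjoin_append (l1 l2 : List String) :
    PySem.Str.join "" (l1 ++ l2) = PySem.Str.join "" l1 ++ PySem.Str.join "" l2 := by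
  induction l1 with
  | nil =>
    have h0 : PySem.Str.join "" ([] : List String) = "" := rfl
    simp [h0]
  | cons s rest ih => simp [sjoin_cons, ih, String.append_assoc]

-- 'code += f(x)' loop = code ++ ''.join(map f)
theorem foldl_append_eq_sjoin {α : Type} (f : α → String) (l : List α) (c : String) :
    l.foldl (fun c x => c ++ f x) c = c ++ PySem.Str.join "" (l.map f) := by
  induction l generalizing c with
  | nil =>
    have h0 : PySem.Str.join "" ([] : List String) = "" := rfl
    simp [h0]
  | cons x rest ih => simp [ih, sjoin_cons, String.append_assoc]

-- list-based versions of A's loops: proof-side models of the counter recursion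
def pvA_innerL {α : Type} (step : α → String → Int → α) (nm : String) (ks : List Int)
    (nav : Int) (st : α) (size : Int) : α × Int :=
  match ks with
  | [] => (st, size)
  | i :: rest =>
    let st' := step st nm i
    let size' := size + 1
    if size' ≥ nav then (st', size') else pvA_innerL step nm rest nav st' size'

def pvA_outerL {α : Type} (step : α → String → Int → α) (names : List String) (ks : List Int)
    (nav : Int) (st : α) (size : Int) : α × Int :=
  match names with
  | [] => (st, size)
  | n :: rest =>
    if size ≥ nav then (st, size)
    else
      let p := pvA_innerL step n ks nav st size
      pvA_outerL step rest ks nav p.1 p.2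

def pvPairsL (names : List String) (ks : List Int) : List (String × Int) :=
  names.flatMap (fun n => ks.map (fun i => (n, i)))

theorem pvPairsL_length (names : List String) (ks : List Int) :
    (pvPairsL names ks).length = names.length * ks.length := by
  induction names with
  | nil => simp [pvPairsL]
  | cons n rest ih =>
    simp only [pvPairsL, List.flatMap_cons, List.length_append, List.length_map,
      List.length_cons] at ih ⊢
    rw [ih]; ring

-- the counter recursion of the port iterates Python's lazy range(i, nbv+1)
theorem pvA_inner_bridge {α : Type} (step : α → String → Int → α) (nm : String) (nbv nav : Int) :
    ∀ (n : Nat) (i : Int) (st : α) (s : Int), (nbv + 1 - i).toNat = n →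
      pvA_inner step nm nbv nav st s i = pvA_innerL step nm (PySem.List.pyRange i (nbv + 1) 1) nav st s := by
  intro n
  induction n with
  | zero =>
    intro i st s h
    rw [PySem.List.pyRange_one_eq_nil (by omega)]
    rw [pvA_inner, if_pos (by omega : nbv + 1 ≤ i)]
    rfl
  | succ k ih =>
    intro i st s h
    rw [PySem.List.pyRange_one_cons (by omega : i < nbv + 1)]
    rw [pvA_inner, if_neg (by omega)]
    show (if s + 1 ≥ nav then (step st nm i, s + 1)
          else pvA_inner step nm nbv nav (step st nm i) (s + 1) (i + 1)) = _
    simp only [pvA_innerL]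
    by_cases hb : s + 1 ≥ nav
    · simp [hb]
    · simp only [if_neg hb]
      exact ih (i + 1) (step st nm i) (s + 1) (by omega)

theorem pvA_outer_bridge {α : Type} (step : α → String → Int → α) (nbv nav : Int) :
    ∀ (names : List String) (st : α) (s : Int),
      pvA_outer step names nbv nav st s = pvA_outerL step names (PySem.List.pyRange 1 (nbv + 1) 1) nav st s := by
  intro names
  induction names with
  | nil => intro st s; rfl
  | cons n rest ih =>
    intro st s
    simp only [pvA_outer, pvA_outerL]
    by_cases h : s ≥ nav
    · simp [h]
    · simp only [if_neg h]
      rw [pvA_inner_bridge step n nbv nav _ 1 st s rfl]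
      rw [ih]

-- characterisation of the inner loop: it consumes the next (nav - size) pairs
theorem pvA_innerL_eq {α : Type} (step : α → String → Int → α) (nm : String) (nav : Int) :
    ∀ (ks : List Int) (st : α) (s : Int), s < nav →
      pvA_innerL step nm ks nav st s =
        ((ks.take (nav - s).toNat).foldl (fun a i => step a nm i) st,
          s + min ((nav - s).toNat) ks.length) := by
  intro ks
  induction ks with
  | nil => intro st s h; simp [pvA_innerL]
  | cons i rest ih =>
    intro st s h
    by_cases h2 : s + 1 ≥ nav
    · have hnav : nav = s + 1 := by omega
      have hk : (nav - s).toNat = 1 := by omega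
      simp [pvA_innerL, h2, hk]
    · have hk : (nav - s).toNat = (nav - (s + 1)).toNat + 1 := by omega
      simp only [pvA_innerL, ge_iff_le, if_neg h2]
      rw [ih _ (s + 1) (by omega)]
      rw [hk]
      simp [List.take_succ_cons, Nat.succ_min_succ]
      omega

-- characterisation of A's outer loop: it folds the step over the first
-- (nav - size) elements of the flat pair list
theorem pvA_outerL_eq {α : Type} (step : α → String → Int → α) (ks : List Int) (nav : Int) :
    ∀ (names : List String) (st : α) (s : Int),
      pvA_outerL step names ks nav st s =
        (((pvPairsL names ks).take ((nav - s).toNat)).foldl (fun a p => step a p.1 p.2) st,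
          s + min ((nav - s).toNat) (pvPairsL names ks).length) := by
  intro names
  induction names with
  | nil => intro st s; simp [pvA_outerL, pvPairsL]
  | cons n rest ih =>
    intro st s
    by_cases h : s ≥ nav
    · have hk : (nav - s).toNat = 0 := by omega
      simp [pvA_outerL, h, hk]
    · simp only [pvA_outerL, ge_iff_le, if_neg h]
      rw [pvA_innerL_eq step n nav ks st s (by omega)]
      rw [ih]
      have hpl : pvPairsL (n :: rest) ks = ks.map (fun i => (n, i)) ++ pvPairsL rest ks := by
        simp [pvPairsL]
      rw [hpl]
      set k := (nav - s).toNat with hkdef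
      set L := ks.length with hLdef
      have hk2 : (nav - (s + min k L)).toNat = k - L := by omega
      rw [hk2]
      rw [List.take_append]
      rw [List.foldl_append]
      have hmt : (ks.map (fun i => (n, i))).take k = (ks.take k).map (fun i => (n, i)) := by
        rw [List.map_take]
      rw [hmt, List.foldl_map]
      simp [List.length_append]
      constructor
      · rfl
      · omega

-- the two previous facts combined, in the port's vocabulary
theorem pvA_outer_eq {α : Type} (step : α → String → Int → α) (names : List String)
    (nbv nav : Int) (st : α) (s : Int) :
    pvA_outer step names nbv nav st s =
      (((pvPairs names nbv).take ((nav - s).toNat)).foldl (fun a p => step a p.1 p.2) st,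
        s + min ((nav - s).toNat) (pvPairs names nbv).length) := by
  rw [pvA_outer_bridge, pvA_outerL_eq]
  rfl

-- the class-definition suffix A appends line by line = B's single literal
set_option maxRecDepth 8192 in
theorem pvClassLit : (":\n    def __init__(self, v):\n        self.v = v\n    def get_v(self):\n        return self.v\n\n" : String) = ":\n" ++ ("    def __init__(self, v):\n" ++ ("        self.v = v\n" ++ ("    def get_v(self):\n" ++ "        return self.v\n\n"))) := by decide

set_option maxRecDepth 8192 in
theorem pvFootLit1 : ("x = tmp\ny = tmp\n\ndef loop(c, f, y):\n    if c > 0:\n        f(y)\n        loop(c - 1, f, y)\n    else:\n        return\n\nf = x.__add__\nm = " : String) = "x = tmp\n" ++ ("y = tmp\n" ++ ("\n" ++ ("def loop(c, f, y):\n" ++ ("    if c > 0:\n" ++ ("        f(y)\n" ++ ("        loop(c - 1, f, y)\n" ++ ("    else:\n" ++ ("        return\n\n" ++ ("f = x.__add__\n" ++ "m = "))))))))) := by decide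

set_option maxRecDepth 8192 in
theorem pvFootLit2 : ("\n\ndef main(m, f, y):\n   loop(m, f, y)\n" : String) = "\n" ++ ("\n" ++ ("def main(m, f, y):\n" ++ "   loop(m, f, y)\n")) := by decide

-- A's class-definition loop body = ''.join over B's class blocks
theorem foldl_class (l : List (String × Int)) (c : String) :
    List.foldl (fun a p => a ++ "class " ++ p.1 ++ "!" ++ PySem.Int.toStr p.2 ++ ":\n" ++ "    def __init__(self, v):\n" ++ "        self.v = v\n" ++ "    def get_v(self):\n" ++ "        return self.v\n\n") c l
      = c ++ PySem.Str.join "" (l.map (fun p => pvB_classBlock p.1 p.2)) := by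
  rw [← foldl_append_eq_sjoin (fun p : String × Int => pvB_classBlock p.1 p.2) l c]
  have hf : (fun (a : String) (p : String × Int) => a ++ "class " ++ p.1 ++ "!" ++ PySem.Int.toStr p.2 ++ ":\n" ++ "    def __init__(self, v):\n" ++ "        self.v = v\n" ++ "    def get_v(self):\n" ++ "        return self.v\n\n")
      = (fun a p => a ++ pvB_classBlock p.1 p.2) := by
    funext a p
    simp only [pvB_classBlock, pvClassLit, String.append_assoc]
  rw [hf]

theorem foldl_inst (l : List (String × Int)) (c : String) :
    List.foldl (fun a p => a ++ "i" ++ PySem.Str.lower p.1 ++ PySem.Int.toStr p.2 ++ " = " ++ p.1 ++ "!" ++ PySem.Int.toStr p.2 ++ "(1)\n") c l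
      = c ++ PySem.Str.join "" (l.map (fun p => pvB_instLine p.1 p.2)) := by
  rw [← foldl_append_eq_sjoin (fun p : String × Int => pvB_instLine p.1 p.2) l c]
  have hf : (fun (a : String) (p : String × Int) => a ++ "i" ++ PySem.Str.lower p.1 ++ PySem.Int.toStr p.2 ++ " = " ++ p.1 ++ "!" ++ PySem.Int.toStr p.2 ++ "(1)\n")
      = (fun a p => a ++ pvB_instLine p.1 p.2) := by
    funext a p
    simp only [pvB_instLine, String.append_assoc]
  rw [hf]

-- A's value loop (code and with_version_values together)
theorem foldl_val_pair (l : List (String × Int)) (c : String) (vs : List String) :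
    List.foldl (fun (a : String × List String) p => (a.1 ++ "v" ++ PySem.Str.lower p.1 ++ PySem.Int.toStr p.2 ++ " = i" ++ PySem.Str.lower p.1 ++ PySem.Int.toStr p.2 ++ ".get_v()\n", a.2 ++ ["v" ++ PySem.Str.lower p.1 ++ PySem.Int.toStr p.2])) (c, vs) l
      = (c ++ PySem.Str.join "" (l.map (fun p => pvB_valLine p.1 p.2)), vs ++ l.map (fun p => pvB_vName p.1 p.2)) := by
  induction l generalizing c vs with
  | nil => simp [show PySem.Str.join "" ([] : List String) = "" from rfl]
  | cons p rest ih =>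
    simp only [List.foldl_cons, List.map_cons, ih, sjoin_cons]
    simp [pvB_valLine, pvB_vName, String.append_assoc]

theorem foldl_tmp (vals : List String) (r : List Int) (c : String) :
    List.foldl (fun c i => if i ≠ 0 then c ++ "tmp = tmp + " ++ PySem.List.pyGetD vals i "" ++ "\n" else c ++ "tmp = " ++ PySem.List.pyGetD vals i "" ++ "\n") c r
      = c ++ PySem.Str.join "" (r.map (fun i => if i ≠ 0 then "tmp = tmp + " ++ PySem.List.pyGetD vals i "" ++ "\n" else "tmp = " ++ PySem.List.pyGetD vals i "" ++ "\n")) := by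
  rw [← foldl_append_eq_sjoin (fun i => if i ≠ 0 then "tmp = tmp + " ++ PySem.List.pyGetD vals i "" ++ "\n" else "tmp = " ++ PySem.List.pyGetD vals i "" ++ "\n") r c]
  have hf : (fun (c : String) (i : Int) => if i ≠ 0 then c ++ "tmp = tmp + " ++ PySem.List.pyGetD vals i "" ++ "\n" else c ++ "tmp = " ++ PySem.List.pyGetD vals i "" ++ "\n")
      = (fun c i => c ++ if i ≠ 0 then "tmp = tmp + " ++ PySem.List.pyGetD vals i "" ++ "\n" else "tmp = " ++ PySem.List.pyGetD vals i "" ++ "\n") := by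
    funext c i
    by_cases h : i = 0 <;> simp [h, String.append_assoc]
  rw [hf]

theorem foldl_pad (vals : List String) (r : List Int) (c : String) :
    List.foldl (fun c (_ : Int) => c ++ "tmp = tmp + " ++ PySem.List.pyGetD vals 0 "" ++ "\n") c r
      = c ++ PySem.Str.join "" (r.map (fun (_ : Int) => "tmp = tmp + " ++ PySem.List.pyGetD vals 0 "" ++ "\n")) := by
  rw [← foldl_append_eq_sjoin (fun (_ : Int) => "tmp = tmp + " ++ PySem.List.pyGetD vals 0 "" ++ "\n") r c]
  have hf : (fun (c : String) (_ : Int) => c ++ "tmp = tmp + " ++ PySem.List.pyGetD vals 0 "" ++ "\n")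
      = (fun (c : String) (_ : Int) => c ++ ("tmp = tmp + " ++ PySem.List.pyGetD vals 0 "" ++ "\n")) := by
    funext c i
    simp [String.append_assoc]
  rw [hf]

-- A's literal-by-literal footer = B's footer
theorem footer_eq (c : String) (loop : Int) :
    c ++ "x = tmp\n" ++ "y = tmp\n" ++ "\n" ++ "def loop(c, f, y):\n" ++ "    if c > 0:\n" ++ "        f(y)\n" ++ "        loop(c - 1, f, y)\n" ++ "    else:\n" ++ "        return\n\n" ++ "f = x.__add__\n" ++ "m = " ++ PySem.Int.toStr loop ++ "\n" ++ "\n" ++ "def main(m, f, y):\n" ++ "   loop(m, f, y)\n"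
      = c ++ pvB_footer loop := by
  simp only [pvB_footer, pvFootLit1, pvFootLit2, String.append_assoc]

theorem generate_vython_code_spec : Claim_equal_generate_vython_code := by
  intro loop nbn nbv nav hdom hpre
  unfold Spec_generate_vython_code
  simp only [generate_vython_code, generate_vython_code_alt]
  rw [PySem.List.slice_to _ (by omega : (0:Int) ≤ max nav 0)]
  have hmax : (max nav 0).toNat = nav.toNat := by omega
  rw [hmax]
  simp only [pvA_outer_eq, sub_zero]
  simp only [foldl_val_pair]
  simp only [foldl_class, foldl_inst, foldl_tmp, foldl_pad, List.nil_append]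
  rw [footer_eq]
  rw [PySem.List.enumerate_eq_map_pyRange _ ""]
  simp only [List.map_map, Function.comp_def]
  simp only [Pre_generate_vython_code] at hpre
  by_cases hn : 0 ≤ nav
  · -- the generated value list has exactly nav entries
    have hplen : (pvPairs (List.map (fun i => "TestClass" ++ PySem.Int.toStr i) (PySem.List.pyRange 0 nbn)) nbv).length = nbn.toNat * nbv.toNat := by
      rw [show pvPairs (List.map (fun i => "TestClass" ++ PySem.Int.toStr i) (PySem.List.pyRange 0 nbn)) nbv = pvPairsL (List.map (fun i => "TestClass" ++ PySem.Int.toStr i) (PySem.List.pyRange 0 nbn)) (PySem.List.pyRange 1 (nbv + 1) 1) from rfl, pvPairsL_length]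
      simp only [List.length_map, PySem.List.length_pyRange_one]
      congr 1 <;> omega
    have hcast : ((nbn.toNat * nbv.toNat : Nat) : Int) = max nbn 0 * max nbv 0 := by
      push_cast
      rw [Int.toNat_eq_max, Int.toNat_eq_max]
    have hmin : min nav.toNat (nbn.toNat * nbv.toNat) = nav.toNat := by
      by_cases h0 : 0 < nav
      · rw [if_pos h0] at hpre
        rw [← hcast] at hpre
        omega
      · omega
    have hvlen : PySem.List.len (List.map (fun p => pvB_vName p.1 p.2) (List.take nav.toNat (pvPairs (List.map (fun i => "TestClass" ++ PySem.Int.toStr i) (PySem.List.pyRange 0 nbn)) nbv))) = nav := by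
      simp only [PySem.List.len, List.length_map, List.length_take, hplen, hmin]
      omega
    rw [hvlen]
    simp [sjoin_append, sjoin_cons, sjoin_nil, String.append_assoc]
  · -- num_actual_versions < 0: both programs emit nothing before the footer
    rw [if_neg (by omega)] at hpre
    have h1 : PySem.List.pyRange 0 nav = [] := PySem.List.pyRange_one_eq_nil (by omega)
    have h2 : PySem.List.pyRange 0 (nbn * nbv - nav) = [] := PySem.List.pyRange_one_eq_nil (by omega)
    have h3 : nav.toNat = 0 := by omega
    rw [h1, h2, h3]
    simp [sjoin_cons, sjoin_nil, String.append_assoc,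
      show PySem.List.pyRange 0 0 = ([] : List Int) from rfl]
    rw [show ("\n\n" : String) = "\n" ++ "\n" from by decide, String.append_assoc]
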